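-- pv_equiv track=rewrite | github.com/wapapapapoo/LSPG-Net | action/run_test_cityscapes.py | make_palette_flat
-- ===== SOURCE A (Python) =====
-- def make_palette_flat(palette_dict: dict) -> list:
--     flat = [0] * (256 * 3)
--     for idx, col in palette_dict.items():
--         i = int(idx) & 0xFF
--         flat[i * 3 + 0] = int(col[0])
--         flat[i * 3 + 1] = int(col[1])
--         flat[i * 3 + 2] = int(col[2])
--     return flat
-- ===== SOURCE B (Python) =====
-- def make_palette_flat(palette_dict: dict) -> list:
--     colors = {int(idx) & 0xFF: col for idx, col in palette_dict.items()}
--     flat = []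
--     for i in range(256):
--         r, g, b = colors[i][:3] if i in colors else (0, 0, 0)
--         flat += [int(r), int(g), int(b)]
--     return flat
-- ===== Notes on version B (the rewrite author's own statement) =====
-- stated objective: alternative
-- what changed: A scatters each palette entry into a preallocated 768-slot array; B first builds an index-to-color dict keyed by the masked index (last entry wins) and then gathers the 256 three-channel blocks in output order, defaulting unset slots to three zeros.
import Mathlib
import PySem

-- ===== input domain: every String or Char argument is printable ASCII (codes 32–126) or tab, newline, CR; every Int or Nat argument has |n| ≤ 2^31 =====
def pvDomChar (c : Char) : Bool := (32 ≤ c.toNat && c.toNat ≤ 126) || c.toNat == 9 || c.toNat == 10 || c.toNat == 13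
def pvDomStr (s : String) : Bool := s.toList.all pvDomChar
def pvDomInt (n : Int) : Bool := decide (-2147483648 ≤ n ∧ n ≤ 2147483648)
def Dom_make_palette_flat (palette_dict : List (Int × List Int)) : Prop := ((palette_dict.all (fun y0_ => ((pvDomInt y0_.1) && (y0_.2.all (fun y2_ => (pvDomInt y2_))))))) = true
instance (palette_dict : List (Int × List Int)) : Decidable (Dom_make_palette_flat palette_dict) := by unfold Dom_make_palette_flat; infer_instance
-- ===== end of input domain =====

-- B replaces A's scatter into a preallocated 768-array by building an index→color map first
-- and then gathering the 256 three-channel blocks in output order (alternative decomposition, same cost).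

-- ===== PORT A =====
-- the body of A's for-loop: two writes into the flat list per channel index
def pvStepA (flat : List Int) (kv : Int × List Int) : List Int :=
  let i := PySem.Int.band kv.1 255
  let flat := PySem.List.pySetD flat (i * 3 + 0) (PySem.List.pyGetD kv.2 0 0)
  let flat := PySem.List.pySetD flat (i * 3 + 1) (PySem.List.pyGetD kv.2 1 0)
  PySem.List.pySetD flat (i * 3 + 2) (PySem.List.pyGetD kv.2 2 0)

def make_palette_flat (palette_dict : List (Int × List Int)) : List Int :=
  palette_dict.foldl pvStepA (List.replicate (256 * 3) 0)

-- ===== PORT B =====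
-- first phase of B: the masked-key dict comprehension (later colliding keys overwrite earlier ones)
def pvColorMap (palette_dict : List (Int × List Int)) : PySem.Dict Int (List Int) :=
  palette_dict.foldl (fun d kv => d.insert (PySem.Int.band kv.1 255) kv.2) PySem.Dict.empty

-- one block of B's gather: colors[i][:3] if i in colors else (0, 0, 0)
def pvBlock (colors : PySem.Dict Int (List Int)) (i : Int) : List Int :=
  match colors.get? i with
  | some col => PySem.List.slice col none (some 3)
  | none => [0, 0, 0]

-- 'r, g, b = block' unpacks exactly three values; Python raises ValueError on any other
-- length (those inputs are outside Pre_), so the default branch is never reached under Pre_.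
def pvUnpack3 (block : List Int) : List Int :=
  match block with
  | [r, g, b] => [r, g, b]
  | _ => []

def make_palette_flat_alt (palette_dict : List (Int × List Int)) : List Int :=
  let colors := pvColorMap palette_dict
  (PySem.List.pyRange 0 256 1).flatMap (fun i => pvUnpack3 (pvBlock colors i))

-- ===== PRECONDITION & SPEC =====
-- A raises IndexError on col[1] / col[2] when some color has fewer than 3 channels; Pre_ excludes exactly those inputs.
def Pre_make_palette_flat (palette_dict : List (Int × List Int)) : Prop :=
  ∀ kv ∈ palette_dict, 3 ≤ kv.2.length
instance (palette_dict : List (Int × List Int)) : Decidable (Pre_make_palette_flat palette_dict) := by unfold Pre_make_palette_flat; infer_instance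
def pvWitness_make_palette_flat : (List (Int × List Int)) := [((7 : Int), [(255 : Int), 0, 0])]

def Spec_make_palette_flat (palette_dict : List (Int × List Int)) (out : List Int) : Prop := out = make_palette_flat_alt palette_dict
instance (palette_dict : List (Int × List Int)) (out : List Int) : Decidable (Spec_make_palette_flat palette_dict out) := by unfold Spec_make_palette_flat; infer_instance

-- ===== CLAIM (what is proved, stated in full; the proofs are below) =====
def Claim_equal_make_palette_flat : Prop := ∀ (palette_dict : List (Int × List Int)), Dom_make_palette_flat palette_dict → Pre_make_palette_flat palette_dict → Spec_make_palette_flat palette_dict (make_palette_flat palette_dict)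

-- ===== LEMMAS AND PROOFS =====

-- Python's idx & 0xFF is floor-mod 256
lemma pvBand255 (a : Int) : PySem.Int.band a 255 = a % 256 := by
  unfold PySem.Int.band
  have h255 : ((255 : Int).toNat) = 255 := rfl
  by_cases h : 0 ≤ a
  · rw [if_pos h, if_pos (by norm_num : (0 : Int) ≤ 255)]
    have hA : a.toNat &&& (255 : Int).toNat = a.toNat % 256 :=
      Nat.and_two_pow_sub_one_eq_mod a.toNat 8
    rw [hA]; omega
  · rw [if_neg h, if_pos (by norm_num : (0 : Int) ≤ 255)]
    have hA : (255 : Int).toNat &&& (-a - 1).toNat = (-a - 1).toNat % 256 := by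
      rw [Nat.and_comm]; exact Nat.and_two_pow_sub_one_eq_mod _ 8
    rw [hA]; omega

-- the gather phase of B over an arbitrary dict
def pvGatherD (d : PySem.Dict Int (List Int)) : List Int :=
  (PySem.List.pyRange 0 256 1).flatMap (fun i => pvBlock d i)

-- flatMap over an initial segment of the naturals
def pvG (g : Nat → List Int) (n : Nat) : List Int := (List.range n).flatMap g

-- every value stored in the dict has at least 3 channels
def pvInv (d : PySem.Dict Int (List Int)) : Prop :=
  ∀ j col, d.get? j = some col → 3 ≤ col.length

lemma pvLen_block (d : PySem.Dict Int (List Int)) (hinv : pvInv d) (i : Int) :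
    (pvBlock d i).length = 3 := by
  cases hd : d.get? i with
  | none => simp [pvBlock, hd]
  | some col =>
    have h3 := hinv _ _ hd
    simp only [pvBlock, hd]
    rw [PySem.List.slice_to _ (by norm_num)]
    simp [List.length_take]
    omega

lemma pvBlock_insert (d : PySem.Dict Int (List Int)) (i j : Int) (col : List Int) :
    pvBlock (d.insert i col) j
      = if j = i then PySem.List.slice col none (some 3) else pvBlock d j := by
  unfold pvBlock
  rw [PySem.Dict.get?_insert]
  by_cases h : j = i <;> simp [h]

lemma pvLen_pvG (g : Nat → List Int) (hlen : ∀ j, (g j).length = 3) (n : Nat) :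
    (pvG g n).length = 3 * n := by
  induction n with
  | zero => simp [pvG]
  | succ n ih =>
    simp only [pvG, List.range_succ, List.flatMap_append, List.length_append] at *
    simp [ih, hlen]; omega

lemma pvG_congr (g g' : Nat → List Int) (n : Nat) (h : ∀ j < n, g j = g' j) :
    pvG g n = pvG g' n := by
  unfold pvG
  exact List.flatMap_congr (fun a ha => h a (List.mem_range.mp ha))

lemma pvSet_pvG (g : Nat → List Int) (hlen : ∀ j, (g j).length = 3) (n i k : Nat)
    (hi : i < n) (hk : k < 3) (v : Int) :
    (pvG g n).set (i * 3 + k) v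
      = pvG (fun j => if j = i then (g i).set k v else g j) n := by
  induction n with
  | zero => omega
  | succ n ih =>
    simp only [pvG, List.range_succ, List.flatMap_append, List.flatMap_cons,
      List.flatMap_nil, List.append_nil] at *
    rw [List.set_append]
    have hlenG : ((List.range n).flatMap g).length = 3 * n := pvLen_pvG g hlen n
    by_cases hin : i < n
    · have hlt : i * 3 + k < ((List.range n).flatMap g).length := by rw [hlenG]; omega
      rw [if_pos hlt, ih hin]
      have hne : n ≠ i := by omega
      rw [if_neg hne]
    · have hie : i = n := by omega
      subst hie
      have hnlt : ¬ i * 3 + k < ((List.range i).flatMap g).length := by rw [hlenG]; omega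
      rw [if_neg hnlt, if_pos rfl, hlenG]
      have hidx : i * 3 + k - 3 * i = k := by omega
      rw [hidx]
      congr 1
      exact List.flatMap_congr (fun a ha => by
        have : a < i := List.mem_range.mp ha
        rw [if_neg (by omega)])

lemma pvGatherD_eq_pvG (d : PySem.Dict Int (List Int)) :
    pvGatherD d = pvG (fun k => pvBlock d (k : Int)) 256 := by
  unfold pvGatherD pvG
  rw [PySem.List.pyRange_one]
  have h : ((256 : Int) - 0).toNat = 256 := rfl
  rw [h]
  norm_num [List.flatMap_map]

lemma pvTake3 (col : List Int) (h : 3 ≤ col.length) :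
    PySem.List.slice col none (some 3)
      = [PySem.List.pyGetD col 0 0, PySem.List.pyGetD col 1 0, PySem.List.pyGetD col 2 0] := by
  rcases col with _ | ⟨c0, _ | ⟨c1, _ | ⟨c2, rest⟩⟩⟩ <;> simp at h
  have h1 : PySem.List.pyGetD (c0 :: c1 :: c2 :: rest) 1 0 = c1 := by
    simp [PySem.List.pyGetD, PySem.List.pyGet?, PySem.List.pyIdx?]
    rw [if_pos (by omega)]; rfl
  have h2 : PySem.List.pyGetD (c0 :: c1 :: c2 :: rest) 2 0 = c2 := by
    simp [PySem.List.pyGetD, PySem.List.pyGet?, PySem.List.pyIdx?]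
    rw [if_pos (by omega)]; rfl
  rw [PySem.List.slice_to _ (by norm_num), PySem.List.pyGetD_zero_cons, h1, h2]
  rfl

-- one write of A's loop body turns the gather of d into the gather of d.insert
lemma pvStep_gather (d : PySem.Dict Int (List Int)) (hinv : pvInv d)
    (idx : Int) (col : List Int) (hcol : 3 ≤ col.length) :
    pvStepA (pvGatherD d) (idx, col) = pvGatherD (d.insert (PySem.Int.band idx 255) col) := by
  have hi0 : 0 ≤ PySem.Int.band idx 255 := by
    rw [pvBand255]; exact Int.emod_nonneg _ (by norm_num)
  have hilt : PySem.Int.band idx 255 < 256 := by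
    rw [pvBand255]; exact Int.emod_lt_of_pos _ (by norm_num)
  have hiN : (PySem.Int.band idx 255).toNat < 256 := by omega
  unfold pvStepA
  simp only
  rw [PySem.List.pySetD_of_nonneg _ _ (show (0 : Int) ≤ PySem.Int.band idx 255 * 3 + 0 by omega),
    PySem.List.pySetD_of_nonneg _ _ (show (0 : Int) ≤ PySem.Int.band idx 255 * 3 + 1 by omega),
    PySem.List.pySetD_of_nonneg _ _ (show (0 : Int) ≤ PySem.Int.band idx 255 * 3 + 2 by omega)]
  have ht0 : (PySem.Int.band idx 255 * 3 + 0).toNat = (PySem.Int.band idx 255).toNat * 3 + 0 := by omega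
  have ht1 : (PySem.Int.band idx 255 * 3 + 1).toNat = (PySem.Int.band idx 255).toNat * 3 + 1 := by omega
  have ht2 : (PySem.Int.band idx 255 * 3 + 2).toNat = (PySem.Int.band idx 255).toNat * 3 + 2 := by omega
  rw [ht0, ht1, ht2]
  rw [pvGatherD_eq_pvG d, pvGatherD_eq_pvG]
  set g : Nat → List Int := fun k => pvBlock d (k : Int) with hg
  have hlg : ∀ j, (g j).length = 3 := fun j => pvLen_block d hinv _
  rw [pvSet_pvG g hlg 256 (PySem.Int.band idx 255).toNat 0 hiN (by omega) _]
  set g1 : Nat → List Int := fun j => if j = (PySem.Int.band idx 255).toNat then (g (PySem.Int.band idx 255).toNat).set 0 (PySem.List.pyGetD col 0 0) else g j with hg1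
  have hlg1 : ∀ j, (g1 j).length = 3 := by
    intro j; rw [hg1]; by_cases h : j = (PySem.Int.band idx 255).toNat <;> simp [h, hlg]
  rw [pvSet_pvG g1 hlg1 256 (PySem.Int.band idx 255).toNat 1 hiN (by omega) _]
  set g2 : Nat → List Int := fun j => if j = (PySem.Int.band idx 255).toNat then (g1 (PySem.Int.band idx 255).toNat).set 1 (PySem.List.pyGetD col 1 0) else g1 j with hg2
  have hlg2 : ∀ j, (g2 j).length = 3 := by
    intro j; rw [hg2]; by_cases h : j = (PySem.Int.band idx 255).toNat <;> simp [h, hlg1]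
  rw [pvSet_pvG g2 hlg2 256 (PySem.Int.band idx 255).toNat 2 hiN (by omega) _]
  apply pvG_congr
  intro j hj
  by_cases h : j = (PySem.Int.band idx 255).toNat
  · rw [if_pos h, hg2]
    simp only [if_pos rfl]
    rw [hg1]
    simp only [if_pos rfl]
    have hji : ((j : Nat) : Int) = PySem.Int.band idx 255 := by omega
    rw [pvBlock_insert, if_pos hji, pvTake3 col hcol]
    have hb3 : (g (PySem.Int.band idx 255).toNat).length = 3 := hlg _
    rcases hb : g (PySem.Int.band idx 255).toNat with _ | ⟨x, _ | ⟨y, _ | ⟨z, t⟩⟩⟩ <;>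
      rw [hb] at hb3 <;> simp at hb3
    have ht : t = [] := by simpa using hb3
    subst ht
    rfl
  · rw [if_neg h, hg2]
    simp only [if_neg h]
    rw [hg1]
    simp only [if_neg h]
    have hji : ((j : Nat) : Int) ≠ PySem.Int.band idx 255 := by omega
    rw [pvBlock_insert, if_neg hji]

lemma pvInv_insert (d : PySem.Dict Int (List Int)) (hinv : pvInv d)
    (i : Int) (col : List Int) (hcol : 3 ≤ col.length) : pvInv (d.insert i col) := by
  intro j c h
  rw [PySem.Dict.get?_insert] at h
  by_cases hji : j = i
  · rw [if_pos hji] at h; cases h; exact hcol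
  · rw [if_neg hji] at h; exact hinv _ _ h

lemma pvFold_main : ∀ (pd : List (Int × List Int)) (d : PySem.Dict Int (List Int)),
    (∀ kv ∈ pd, 3 ≤ kv.2.length) → pvInv d →
    pd.foldl pvStepA (pvGatherD d)
      = pvGatherD (pd.foldl (fun d kv => d.insert (PySem.Int.band kv.1 255) kv.2) d) := by
  intro pd
  induction pd with
  | nil => intro d _ _; rfl
  | cons kv rest ih =>
    intro d hpre hinv
    have hcol : 3 ≤ kv.2.length := hpre kv (by simp)
    simp only [List.foldl_cons]
    rw [show pvStepA (pvGatherD d) kv = pvGatherD (d.insert (PySem.Int.band kv.1 255) kv.2) by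
      obtain ⟨a, b⟩ := kv; exact pvStep_gather d hinv a b hcol]
    exact ih _ (fun x hx => hpre x (by simp [hx]))
      (pvInv_insert d hinv _ _ hcol)

lemma pvGather_empty : pvGatherD PySem.Dict.empty = List.replicate (256 * 3) 0 := by
  have hb : ∀ i : Int, pvBlock PySem.Dict.empty i = [0, 0, 0] := by
    intro i; unfold pvBlock; rw [PySem.Dict.get?_empty]
  rw [pvGatherD_eq_pvG]
  have : ∀ n : Nat, pvG (fun k => pvBlock PySem.Dict.empty (k : Int)) n = List.replicate (3 * n) 0 := by
    intro n
    induction n with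
    | zero => rfl
    | succ n ih =>
      simp only [pvG, List.range_succ, List.flatMap_append, List.flatMap_cons,
        List.flatMap_nil, List.append_nil] at *
      rw [ih, hb]
      have : 3 * (n + 1) = 3 * n + 3 := by omega
      rw [this, List.replicate_add]
      rfl
  rw [this 256]

lemma pvUnpack3_of_len3 (l : List Int) (h : l.length = 3) : pvUnpack3 l = l := by
  rcases l with _ | ⟨x, _ | ⟨y, _ | ⟨z, _ | ⟨w, t⟩⟩⟩⟩ <;> simp at h
  rfl

lemma pvInv_empty : pvInv PySem.Dict.empty := by
  intro j c h; rw [PySem.Dict.get?_empty] at h; cases h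

lemma pvInv_fold (pd : List (Int × List Int)) :
    ∀ d, (∀ kv ∈ pd, 3 ≤ kv.2.length) → pvInv d →
    pvInv (pd.foldl (fun d kv => d.insert (PySem.Int.band kv.1 255) kv.2) d) := by
  induction pd with
  | nil => intro d _ hinv; exact hinv
  | cons kv rest ih =>
    intro d hpre hinv
    exact ih _ (fun x hx => hpre x (by simp [hx]))
      (pvInv_insert d hinv _ _ (hpre kv (by simp)))

lemma pvAlt_eq_gather (pd : List (Int × List Int)) (hpre : ∀ kv ∈ pd, 3 ≤ kv.2.length) :
    make_palette_flat_alt pd = pvGatherD (pvColorMap pd) := by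
  unfold make_palette_flat_alt pvGatherD
  apply List.flatMap_congr
  intro i _
  exact pvUnpack3_of_len3 _
    (pvLen_block _ (pvInv_fold pd PySem.Dict.empty hpre pvInv_empty) i)

-- ===== VERDICT (by name: the statement is the Claim_ definition above) =====
theorem make_palette_flat_spec : Claim_equal_make_palette_flat := by
  intro pd _ hpre
  unfold Spec_make_palette_flat make_palette_flat
  rw [pvAlt_eq_gather pd hpre, ← pvGather_empty,
    pvFold_main pd PySem.Dict.empty hpre pvInv_empty]
  rfl
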